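-- pv_equiv track=rewrite | github.com/noumenxn/JMCC-helper | src/JMCC/jmcc_extension.py | get_signature_context
-- ===== SOURCE A (Python) =====
-- def get_signature_context(func_token, commas, active_key, used_keys, origin_linked, signatures, assign_count=0):
--     if not func_token: return [], -1
--     real_tok, oid = origin_linked.get(func_token, (func_token, None))
--     if not (sig := signatures.get(real_tok)): return [], -1
--     assigned = set(sig.get('assign', [])[:assign_count]) if assign_count else set()
--     params = [(i, t, v) for i, t, v in zip(sig.get('id',[]), sig.get('type',[]), sig.get('value',[])) if i != oid and i not in assigned]
--     v_idx = next((i for i, (k,_,_) in enumerate(params) if k.startswith('*') and not k.startswith('**')), -1)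
--     if active_key:
--         idx = next((i for i, (k,_,_) in enumerate(params) if k == active_key), -1)
--         return params, (-1 if idx != -1 and active_key in used_keys else idx)
--     avail = [i for i, (k,_,_) in enumerate(params) if k not in used_keys]
--     p_idx = commas - len(used_keys)
--     if p_idx >= 0 and p_idx < len(avail):
--         idx = avail[p_idx]
--         return params, (v_idx if v_idx != -1 and idx >= v_idx else idx)
--     return params, v_idx
-- ===== SOURCE B (Python) =====
-- def get_signature_context(func_token, commas, active_key, used_keys, origin_linked, signatures, assign_count=0):
--     if not func_token:
--         return [], -1
--     real_tok, oid = origin_linked.get(func_token, (func_token, None))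
--     sig = signatures.get(real_tok)
--     if not sig:
--         return [], -1
--     assigned = set(sig.get('assign', [])[:assign_count]) if assign_count else set()
--     used = set(used_keys)
--     p_idx = commas - len(used_keys)
--     params = []
--     v_idx = act_idx = sel = -1
--     navail = 0
--     for k, t, v in zip(sig.get('id', []), sig.get('type', []), sig.get('value', [])):
--         if k == oid or k in assigned:
--             continue
--         pos = len(params)
--         params.append((k, t, v))
--         if v_idx == -1 and k.startswith('*') and not k.startswith('**'):
--             v_idx = pos
--         if active_key:
--             if act_idx == -1 and k == active_key:
--                 act_idx = pos
--         elif k not in used: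
--             if navail == p_idx:
--                 sel = pos
--             navail += 1
--     if active_key:
--         return params, (-1 if act_idx != -1 and active_key in used else act_idx)
--     if p_idx >= 0 and sel != -1:
--         return params, (v_idx if v_idx != -1 and sel >= v_idx else sel)
--     return params, v_idx
-- ===== Notes on version B (the rewrite author's own statement) =====
-- stated objective: alternative
-- what changed: A builds the filtered params list and then rescans it up to three more times (v_idx scan, active-key scan, avail list construction plus indexing); B makes one pass over the zipped signature maintaining params, v_idx, act_idx, the selected available position and a running available-count simultaneously, so the post-filter scans and the avail list disappear.
import Mathlib
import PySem

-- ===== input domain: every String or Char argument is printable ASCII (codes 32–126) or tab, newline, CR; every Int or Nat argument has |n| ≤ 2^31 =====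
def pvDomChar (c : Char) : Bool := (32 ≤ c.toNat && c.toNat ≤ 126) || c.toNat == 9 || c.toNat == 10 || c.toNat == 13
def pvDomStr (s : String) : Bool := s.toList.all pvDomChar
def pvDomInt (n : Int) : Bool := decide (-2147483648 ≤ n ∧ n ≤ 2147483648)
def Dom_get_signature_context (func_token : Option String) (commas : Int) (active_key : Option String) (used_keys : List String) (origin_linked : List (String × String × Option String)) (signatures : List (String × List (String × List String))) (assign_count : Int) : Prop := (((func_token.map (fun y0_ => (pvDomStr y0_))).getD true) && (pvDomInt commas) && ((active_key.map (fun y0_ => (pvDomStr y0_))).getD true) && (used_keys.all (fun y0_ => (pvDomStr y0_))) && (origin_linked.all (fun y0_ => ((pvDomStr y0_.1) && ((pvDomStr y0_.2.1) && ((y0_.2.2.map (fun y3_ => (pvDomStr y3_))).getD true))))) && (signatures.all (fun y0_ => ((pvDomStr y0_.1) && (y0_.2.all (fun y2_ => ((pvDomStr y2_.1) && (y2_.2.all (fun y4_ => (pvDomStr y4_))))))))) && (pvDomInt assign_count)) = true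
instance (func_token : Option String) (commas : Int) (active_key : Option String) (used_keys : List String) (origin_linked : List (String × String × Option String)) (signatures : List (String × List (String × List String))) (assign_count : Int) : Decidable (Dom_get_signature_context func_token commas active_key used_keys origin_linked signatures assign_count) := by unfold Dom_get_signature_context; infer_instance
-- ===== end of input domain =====

-- B replaces A's build-then-rescan structure (filter params, then up to three more scans
-- over params: v_idx, active idx / avail list + indexing) by ONE pass over the zipped
-- signature that maintains params, v_idx, act_idx, the selected available position and a
-- running available-count simultaneously; objective: alternative (single-pass) decomposition.

-- ===== PORT A =====
-- next((i for i,(k,_,_) in enumerate(l) if p k), -1), transliterated with a running index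
def pyNext1 (p : String → Bool) : List (String × String × String) → Int → Int
  | [], _ => -1
  | (k, _, _) :: rest, i => if p k then i else pyNext1 p rest (i + 1)

-- [i for i,(k,_,_) in enumerate(l) if k not in used_keys], transliterated with a running index
def pyAvail (used_keys : List String) : List (String × String × String) → Int → List Int
  | [], _ => []
  | (k, _, _) :: rest, i =>
    if used_keys.contains k then pyAvail used_keys rest (i + 1)
    else i :: pyAvail used_keys rest (i + 1)

def get_signature_context (func_token : Option String) (commas : Int) (active_key : Option String) (used_keys : List String) (origin_linked : List (String × String × Option String)) (signatures : List (String × List (String × List String))) (assign_count : Int) : (List (String × String × String)) × Int :=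
  match func_token with
  | none => ([], -1)
  | some ft =>
    if ft = "" then ([], -1) else
    let rt := (List.lookup ft origin_linked).getD (ft, none)
    let oid : Option String := rt.2
    match List.lookup rt.1 signatures with
    | none => ([], -1)
    | some sig =>
      if sig = [] then ([], -1) else
      let assigned : PySem.Set String :=
        if assign_count ≠ 0 then
          PySem.Set.ofList (PySem.List.slice ((List.lookup "assign" sig).getD []) none (some assign_count))
        else PySem.Set.empty
      let trips := ((List.lookup "id" sig).getD []).zip
        ((((List.lookup "type" sig).getD [])).zip ((List.lookup "value" sig).getD []))
      let params := trips.filter (fun x => !(oid == some x.1) && !(PySem.Set.contains assigned x.1))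
      let v_idx := pyNext1 (fun k => PySem.Str.startswith k "*" && !(PySem.Str.startswith k "**")) params 0
      -- Python truthiness of active_key: None or "" is falsy
      let akv : Option String := match active_key with
        | some s => if s = "" then none else some s
        | none => none
      match akv with
      | some ak =>
        let idx := pyNext1 (fun k => k == ak) params 0
        (params, if idx ≠ -1 ∧ used_keys.contains ak then -1 else idx)
      | none =>
        let avail := pyAvail used_keys params 0
        let p_idx := commas - (used_keys.length : Int)
        if 0 ≤ p_idx ∧ p_idx < (avail.length : Int) then
          let idx := (PySem.List.pyGet? avail p_idx).getD (-1)  -- in range under the guard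
          (params, if v_idx ≠ -1 ∧ v_idx ≤ idx then v_idx else idx)
        else (params, v_idx)

-- ===== PORT B =====
-- B's single pass: state = (pos = len(params) so far, v_idx, act_idx, sel, navail);
-- returns (params, v_idx, act_idx, sel)
def gscLoop (oid : Option String) (assigned : PySem.Set String) (akv : Option String) (used : PySem.Set String) (p_idx : Int) :
    List (String × String × String) → Int → Int → Int → Int → Int →
    (List (String × String × String)) × Int × Int × Int
  | [], _, v, a, s, _ => ([], v, a, s)
  | (k, t, vv) :: rest, pos, v, a, s, n =>
    if !(oid == some k) && !(PySem.Set.contains assigned k) then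
      let v' := if v = -1 ∧ PySem.Str.startswith k "*" ∧ ¬ PySem.Str.startswith k "**" then pos else v
      match akv with
      | some ak =>
        let a' := if a = -1 ∧ k = ak then pos else a
        let r := gscLoop oid assigned akv used p_idx rest (pos + 1) v' a' s n
        ((k, t, vv) :: r.1, r.2)
      | none =>
        if ¬ PySem.Set.contains used k then
          let s' := if n = p_idx then pos else s
          let r := gscLoop oid assigned akv used p_idx rest (pos + 1) v' a s' (n + 1)
          ((k, t, vv) :: r.1, r.2)
        else
          let r := gscLoop oid assigned akv used p_idx rest (pos + 1) v' a s n
          ((k, t, vv) :: r.1, r.2)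
    else gscLoop oid assigned akv used p_idx rest pos v a s n

def get_signature_context_alt (func_token : Option String) (commas : Int) (active_key : Option String) (used_keys : List String) (origin_linked : List (String × String × Option String)) (signatures : List (String × List (String × List String))) (assign_count : Int) : (List (String × String × String)) × Int :=
  match func_token with
  | none => ([], -1)
  | some ft =>
    if ft = "" then ([], -1) else
    let rt := (List.lookup ft origin_linked).getD (ft, none)
    let oid : Option String := rt.2
    match List.lookup rt.1 signatures with
    | none => ([], -1)
    | some sig =>
      if sig = [] then ([], -1) else
      let assigned : PySem.Set String :=
        if assign_count ≠ 0 then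
          PySem.Set.ofList (PySem.List.slice ((List.lookup "assign" sig).getD []) none (some assign_count))
        else PySem.Set.empty
      let trips := ((List.lookup "id" sig).getD []).zip
        ((((List.lookup "type" sig).getD [])).zip ((List.lookup "value" sig).getD []))
      let akv : Option String := match active_key with
        | some s => if s = "" then none else some s
        | none => none
      let usedS : PySem.Set String := PySem.Set.ofList used_keys
      let p_idx := commas - (used_keys.length : Int)
      let r := gscLoop oid assigned akv usedS p_idx trips 0 (-1) (-1) (-1) 0
      let params := r.1
      let v_idx := r.2.1
      let act_idx := r.2.2.1
      let sel := r.2.2.2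
      match akv with
      | some ak => (params, if act_idx ≠ -1 ∧ PySem.Set.contains usedS ak then -1 else act_idx)
      | none =>
        if 0 ≤ p_idx ∧ sel ≠ -1 then
          (params, if v_idx ≠ -1 ∧ v_idx ≤ sel then v_idx else sel)
        else (params, v_idx)

-- ===== PRECONDITION & SPEC =====
def Spec_get_signature_context (func_token : Option String) (commas : Int) (active_key : Option String) (used_keys : List String) (origin_linked : List (String × String × Option String)) (signatures : List (String × List (String × List String))) (assign_count : Int) (out : (List (String × String × String)) × Int) : Prop := out = get_signature_context_alt func_token commas active_key used_keys origin_linked signatures assign_count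
instance (func_token : Option String) (commas : Int) (active_key : Option String) (used_keys : List String) (origin_linked : List (String × String × Option String)) (signatures : List (String × List (String × List String))) (assign_count : Int) (out : (List (String × String × String)) × Int) : Decidable (Spec_get_signature_context func_token commas active_key used_keys origin_linked signatures assign_count out) := by unfold Spec_get_signature_context; infer_instance

-- ===== CLAIM (what is proved, stated in full; the proofs are below) =====
def Claim_equal_get_signature_context : Prop := ∀ (func_token : Option String) (commas : Int) (active_key : Option String) (used_keys : List String) (origin_linked : List (String × String × Option String)) (signatures : List (String × List (String × List String))) (assign_count : Int), Dom_get_signature_context func_token commas active_key used_keys origin_linked signatures assign_count → Spec_get_signature_context func_token commas active_key used_keys origin_linked signatures assign_count (get_signature_context func_token commas active_key used_keys origin_linked signatures assign_count)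

-- ===== LEMMAS AND PROOFS =====

-- proof-side indexing with a -1 default (never selects for a negative index)
def liInt : List Int → Int → Int
  | [], _ => -1
  | x :: r, j => if j = 0 then x else liInt r (j - 1)

theorem pyAvail_nonneg (used_keys : List String) : ∀ (F : List (String × String × String)) (pos : Int), 0 ≤ pos →
    ∀ x ∈ pyAvail used_keys F pos, 0 ≤ x := by
  intro F
  induction F with
  | nil => intro pos _ x hx; simp [pyAvail] at hx
  | cons h t ih =>
    obtain ⟨k, t1, v1⟩ := h
    intro pos hpos x hx
    by_cases hc : used_keys.contains k
    · simp only [pyAvail, hc, reduceIte] at hx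
      exact ih (pos + 1) (by omega) x hx
    · simp only [pyAvail, hc, Bool.false_eq_true, reduceIte] at hx
      rcases List.mem_cons.mp hx with h1 | h1
      · omega
      · exact ih (pos + 1) (by omega) x h1

theorem liInt_neg_one_iff : ∀ (l : List Int) (j : Int), 0 ≤ j → (∀ x ∈ l, 0 ≤ x) →
    (liInt l j = -1 ↔ (l.length : Int) ≤ j) := by
  intro l
  induction l with
  | nil => intro j hj _; simp [liInt]; omega
  | cons x r ih =>
    intro j hj hall
    have hx : 0 ≤ x := hall x (by simp)
    have hlen : (1 : Int) ≤ ((x :: r).length : Int) := by simp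
    by_cases h0 : j = 0
    · subst h0
      simp only [liInt, if_true]
      constructor <;> intro h <;> omega
    · simp only [liInt, if_neg h0]
      rw [ih (j - 1) (by omega) (fun y hy => hall y (by simp [hy]))]
      simp only [List.length_cons]
      push_cast
      omega

theorem liInt_natCast : ∀ (l : List Int) (m : Nat), liInt l (m : Int) = (l[m]?).getD (-1) := by
  intro l
  induction l with
  | nil => intro m; simp [liInt]
  | cons x r ih =>
    intro m
    cases m with
    | zero => simp [liInt]
    | succ m =>
      have h0 : ((m + 1 : Nat) : Int) ≠ 0 := by omega
      have h1 : ((m + 1 : Nat) : Int) - 1 = (m : Int) := by omega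
      simp only [liInt, if_neg h0, h1, ih]
      simp

theorem pyGet?_getD_eq_liInt (l : List Int) (j : Int) (hj : 0 ≤ j) :
    ((PySem.List.pyGet? l j).getD (-1)) = liInt l j := by
  have h : j = ((j.toNat : Nat) : Int) := by omega
  rw [h, PySem.List.pyGet?_natCast, liInt_natCast]

theorem set_contains_ofList (l : List String) (x : String) :
    PySem.Set.contains (PySem.Set.ofList l) x = l.contains x := by
  simp [PySem.Set.contains, List.contains_eq_mem, PySem.Set.mem_ofList]

-- the single-pass loop computes exactly A's scan results over the filtered list
set_option maxHeartbeats 1600000 in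
theorem gscLoop_spec (oid : Option String) (assigned : PySem.Set String) (akv : Option String)
    (used_keys : List String) (p_idx : Int) :
    ∀ (ts : List (String × String × String)) (pos v a s n : Int), 0 ≤ pos →
      (s = -1 ∨ p_idx < n) →
      gscLoop oid assigned akv (PySem.Set.ofList used_keys) p_idx ts pos v a s n =
        (let F := ts.filter (fun x => !(oid == some x.1) && !(PySem.Set.contains assigned x.1));
         (F,
          (if v = -1 then pyNext1 (fun k => PySem.Str.startswith k "*" && !(PySem.Str.startswith k "**")) F pos else v),
          (match akv with
           | some ak => if a = -1 then pyNext1 (fun k => k == ak) F pos else a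
           | none => a),
          (match akv with
           | none => if s = -1 then liInt (pyAvail used_keys F pos) (p_idx - n) else s
           | some _ => s))) := by
  intro ts
  induction ts with
  | nil =>
    intro pos v a s n hpos hs
    simp only [gscLoop, List.filter_nil, pyNext1, pyAvail, liInt]
    cases akv <;> simp only [] <;> split_ifs <;> simp_all
  | cons hd tl ih =>
    obtain ⟨k, t1, v1⟩ := hd
    intro pos v a s n hpos hs
    by_cases hkeep : (!(oid == some k) && !(PySem.Set.contains assigned k)) = true
    · cases akv with
      | some ak =>
        have ih' := ih (pos + 1)
          (if v = -1 ∧ PySem.Str.startswith k "*" ∧ ¬ PySem.Str.startswith k "**" then pos else v)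
          (if a = -1 ∧ k = ak then pos else a) s n (by omega) hs
        simp only [gscLoop, hkeep, reduceIte, ih', List.filter_cons, pyNext1, Prod.mk.injEq]
        clear ih ih'
        refine ⟨trivial, ?_, ?_, trivial⟩
        · split_ifs <;> simp_all
        · split_ifs <;> simp_all
      | none =>
        by_cases hu : PySem.Set.contains (PySem.Set.ofList used_keys) k = true
        · have ih' := ih (pos + 1)
            (if v = -1 ∧ PySem.Str.startswith k "*" ∧ ¬ PySem.Str.startswith k "**" then pos else v)
            a s n (by omega) hs
          have hu' : used_keys.contains k = true := by rwa [set_contains_ofList] at hu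
          simp only [gscLoop, hkeep, hu, reduceIte, ih', List.filter_cons, pyNext1, pyAvail, hu']
          clear ih ih'
          split_ifs <;> simp_all
        · have hs' : (if n = p_idx then pos else s) = -1 ∨ p_idx < n + 1 := by
            rcases hs with h | h
            · by_cases hn : n = p_idx
              · right; omega
              · left; simp [hn, h]
            · right; omega
          have ih' := ih (pos + 1)
            (if v = -1 ∧ PySem.Str.startswith k "*" ∧ ¬ PySem.Str.startswith k "**" then pos else v)
            a (if n = p_idx then pos else s) (n + 1) (by omega) hs'
          have hu' : used_keys.contains k = false := by
            rw [← set_contains_ofList]; simpa using hu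
          simp only [gscLoop, hkeep, hu, reduceIte, Bool.false_eq_true, ih', List.filter_cons,
            pyNext1, pyAvail, hu', liInt, not_false_eq_true, if_true, Prod.mk.injEq]
          clear ih ih'
          refine ⟨trivial, ?_, trivial, ?_⟩
          · split_ifs <;> simp_all
          · have harith : p_idx - n - 1 = p_idx - (n + 1) := by omega
            by_cases hsn : s = -1
            · by_cases hnp : n = p_idx
              · have h0 : p_idx - n = 0 := by omega
                simp [hsn, hnp]
                omega
              · have h0 : ¬ (p_idx - n = 0) := by omega
                simp [hsn, hnp, h0, harith]
            · have : p_idx < n := by rcases hs with h | h; exact absurd h hsn; exact h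
              have hnp : ¬ (n = p_idx) := by omega
              simp [hsn, hnp]
    · have ih' := ih pos v a s n hpos hs
      simp only [gscLoop, hkeep, Bool.false_eq_true, reduceIte, ih', List.filter_cons]

theorem final_none_eq (uk : List String) (F : List (String × String × String)) (p_idx vi : Int) :
    (if 0 ≤ p_idx ∧ p_idx < ((pyAvail uk F 0).length : Int) then
       (F, if vi ≠ -1 ∧ vi ≤ (PySem.List.pyGet? (pyAvail uk F 0) p_idx).getD (-1) then vi
           else (PySem.List.pyGet? (pyAvail uk F 0) p_idx).getD (-1))
     else (F, vi))
    = (if 0 ≤ p_idx ∧ liInt (pyAvail uk F 0) p_idx ≠ -1 then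
        (F, if vi ≠ -1 ∧ vi ≤ liInt (pyAvail uk F 0) p_idx then vi else liInt (pyAvail uk F 0) p_idx)
       else (F, vi)) := by
  by_cases hp : 0 ≤ p_idx
  · have hnn := pyAvail_nonneg uk F 0 (le_refl 0)
    have hiff := liInt_neg_one_iff (pyAvail uk F 0) p_idx hp hnn
    have hval : (PySem.List.pyGet? (pyAvail uk F 0) p_idx).getD (-1) = liInt (pyAvail uk F 0) p_idx :=
      pyGet?_getD_eq_liInt _ _ hp
    rw [hval]
    have hg : (0 ≤ p_idx ∧ p_idx < ((pyAvail uk F 0).length : Int)) ↔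
        (0 ≤ p_idx ∧ liInt (pyAvail uk F 0) p_idx ≠ -1) := by
      constructor
      · rintro ⟨h1, h2⟩
        refine ⟨h1, fun he => ?_⟩
        have := hiff.mp he
        omega
      · rintro ⟨h1, h2⟩
        refine ⟨h1, ?_⟩
        by_contra hlt
        exact h2 (hiff.mpr (by omega))
    simp only [hg]
  · simp [hp]

-- ===== VERDICT (by name: the statement is the Claim_ definition above) =====
theorem get_signature_context_spec : Claim_equal_get_signature_context := by
  unfold Claim_equal_get_signature_context
  intro func_token commas active_key used_keys origin_linked signatures assign_count _
  unfold Spec_get_signature_context get_signature_context get_signature_context_alt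
  cases func_token with
  | none => rfl
  | some f =>
    by_cases hf : f = ""
    · simp only [hf, reduceIte]
    · simp only [if_neg hf]
      cases hsig : List.lookup ((List.lookup f origin_linked).getD (f, none)).1 signatures with
      | none => rfl
      | some sig =>
        by_cases hempty : sig = []
        · simp only [hempty, reduceIte]
        · simp only [if_neg hempty]
          rw [gscLoop_spec]
          · cases active_key with
            | none =>
              simp only [sub_zero, reduceIte]
              exact final_none_eq _ _ _ _
            | some astr =>
              by_cases ha : astr = ""
              · simp only [ha, reduceIte, sub_zero]
                exact final_none_eq _ _ _ _
              · simp only [if_neg ha, reduceIte, set_contains_ofList]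
          · omega
          · left; rfl
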